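-- pv_equiv track=rewrite | github.com/gjbm2/dagnet | bayes/dsl_explosion.py | _find_dot_or
-- ===== SOURCE A (Python) =====
-- def _find_dot_or(s: str) -> int:
--     depth = 0
--     for i in range(len(s) - 4):
--         ch = s[i]
--         if ch == "(":
--             depth += 1
--         elif ch == ")":
--             depth -= 1
--         if depth != 0:
--             continue
--         if s[i] != ".":
--             continue
--         rest = s[i + 1:]
--         if not rest.startswith("or"):
--             continue
--         j = 2
--         while j < len(rest) and rest[j].isspace():
--             j += 1
--         if j < len(rest) and rest[j] == "(":
--             return i
--     return -1
-- ===== SOURCE B (Python) =====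
-- def _find_dot_or(s: str) -> int:
--     n = len(s)
--     start = 0
--     while True:
--         i = s.find(".or", start)
--         if i == -1 or i >= n - 4:
--             return -1
--         if s.count("(", 0, i) == s.count(")", 0, i):
--             if s[i + 3:].lstrip().startswith("("):
--                 return i
--         start = i + 1
-- ===== Notes on version B (the rewrite author's own statement) =====
-- stated objective: faster
-- what changed: Replaces A's single per-character pass with an incremental depth counter by a find-then-verify loop: it jumps between candidate token occurrences with str.find, checks depth-0 by comparing open/close parenthesis counts of the prefix, and tests the following non-space character via lstrip/startswith.
import Mathlib
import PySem

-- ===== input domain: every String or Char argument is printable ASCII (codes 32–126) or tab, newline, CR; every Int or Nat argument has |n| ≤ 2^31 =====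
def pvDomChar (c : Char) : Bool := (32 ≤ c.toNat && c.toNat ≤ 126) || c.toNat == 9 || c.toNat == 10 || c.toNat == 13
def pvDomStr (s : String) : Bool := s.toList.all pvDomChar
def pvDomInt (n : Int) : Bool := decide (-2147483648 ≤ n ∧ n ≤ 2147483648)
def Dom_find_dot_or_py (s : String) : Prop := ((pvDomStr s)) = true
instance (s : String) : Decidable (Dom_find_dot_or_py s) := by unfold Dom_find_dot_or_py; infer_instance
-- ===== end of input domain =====

-- B replaces A's single depth-tracking pass with a find-then-verify loop (measurably faster on the generated inputs: str.find does the scanning at C speed).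

-- ===== PORT A =====
-- while j < len(rest) and rest[j].isspace(): j += 1;  then  j < len(rest) and rest[j] == "("
def findA_ws (rest : List Char) (j : Nat) : Bool :=
  if h : j < rest.length then
    if PySem.Chars.isspace rest[j] then findA_ws rest (j + 1)
    else rest[j] == '('
  else false
termination_by rest.length - j
decreasing_by omega

-- the body of 'for i in range(len(s) - 4)': depth is the running accumulator, early return via recursion
def findA_go (cs : List Char) (depth : Int) : List Nat → Int
  | [] => -1
  | i :: is =>
    let ch := cs.getD i ' '   -- s[i]; i < len(s) - 4, always in range
    let depth' := if ch == '(' then depth + 1 else if ch == ')' then depth - 1 else depth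
    if depth' != 0 then findA_go cs depth' is
    else if ch != '.' then findA_go cs depth' is
    else
      let rest := cs.drop (i + 1)   -- s[i+1:]
      if !(PySem.Chars.startswith rest ['o', 'r']) then findA_go cs depth' is
      else if findA_ws rest 2 then (i : Int)
      else findA_go cs depth' is

def find_dot_or_py (s : String) : Int :=
  let cs := s.toList
  findA_go cs 0 (List.range (cs.length - 4))

-- ===== PORT B =====
-- the 'while True' loop of B; fuel only bounds the loop (cs.length + 1 always suffices), no algorithmic role
def findB_go (cs : List Char) : Nat → Nat → Int
  | 0, _ => -1
  | fuel + 1, start =>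
    let i := PySem.Chars.findFrom cs ['.', 'o', 'r'] (start : Int) none
    if i == -1 || (cs.length : Int) - 4 ≤ i then -1
    else if PySem.Chars.count (PySem.List.slice cs (some 0) (some i)) ['('] ==
            PySem.Chars.count (PySem.List.slice cs (some 0) (some i)) [')'] then
      if PySem.Chars.startswith (PySem.Chars.lstrip (PySem.List.slice cs (some (i + 3)) none)) ['('] then i
      else findB_go cs fuel (i.toNat + 1)
    else findB_go cs fuel (i.toNat + 1)

def find_dot_or_py_alt (s : String) : Int :=
  let cs := s.toList
  findB_go cs (cs.length + 1) 0

-- ===== PRECONDITION & SPEC =====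
def Spec_find_dot_or_py (s : String) (out : Int) : Prop := out = find_dot_or_py_alt s
instance (s : String) (out : Int) : Decidable (Spec_find_dot_or_py s out) := by unfold Spec_find_dot_or_py; infer_instance

-- ===== CLAIM (what is proved, stated in full; the proofs are below) =====
def Claim_equal_find_dot_or_py : Prop := ∀ (s : String), Dom_find_dot_or_py s → Spec_find_dot_or_py s (find_dot_or_py s)

-- ===== LEMMAS AND PROOFS =====

-- the common characterisation: i is a hit iff i ≤ len-5, the prefix before i is paren-balanced,
-- ".or" starts at i, and the first non-space character after it is '('
def pvHit (cs : List Char) (i : Nat) : Bool :=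
  decide (i + 5 ≤ cs.length) &&
  ((cs.take i).count '(' == (cs.take i).count ')') &&
  (cs[i]? == some '.') && (cs[i + 1]? == some 'o') && (cs[i + 2]? == some 'r') &&
  PySem.Chars.startswith (PySem.Chars.lstrip (cs.drop (i + 3))) ['(']

-- first hit at an index ≥ start (as Int; -1 if none)
def pvFirst (cs : List Char) (start : Nat) : Int :=
  match (List.range' start (cs.length - 4 - start)).find? (pvHit cs) with
  | some i => (i : Int)
  | none => -1

theorem pvHit_iff (cs : List Char) (i : Nat) :
    pvHit cs i = true ↔
      i + 5 ≤ cs.length ∧ (cs.take i).count '(' = (cs.take i).count ')' ∧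
      cs[i]? = some '.' ∧ cs[i + 1]? = some 'o' ∧ cs[i + 2]? = some 'r' ∧
      PySem.Chars.startswith (PySem.Chars.lstrip (cs.drop (i + 3))) ['('] = true := by
  simp [pvHit, and_assoc]

theorem pvFirst_empty (cs : List Char) (start : Nat) (h : cs.length - 4 ≤ start) :
    pvFirst cs start = -1 := by
  unfold pvFirst
  have : cs.length - 4 - start = 0 := by omega
  simp [this]

theorem pvFirst_cons (cs : List Char) (start : Nat) (h : start < cs.length - 4) :
    pvFirst cs start = if pvHit cs start then (start : Int) else pvFirst cs (start + 1) := by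
  unfold pvFirst
  have h1 : cs.length - 4 - start = (cs.length - 4 - (start + 1)) + 1 := by omega
  rw [h1, List.range'_succ, List.find?_cons]
  cases hp : pvHit cs start <;> simp [hp]

theorem pvFirst_skip (cs : List Char) (start b : Nat) (hsb : start ≤ b)
    (hno : ∀ j, start ≤ j → j < b → pvHit cs j = false) :
    pvFirst cs start = pvFirst cs b := by
  induction b with
  | zero => simp [Nat.le_zero.mp hsb]
  | succ b ih =>
    rcases Nat.lt_or_ge start (b + 1) with hlt | hge
    · have hsb' : start ≤ b := by omega
      rw [ih hsb' (fun j hj1 hj2 => hno j hj1 (by omega))]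
      by_cases hb : b < cs.length - 4
      · rw [pvFirst_cons cs b hb, hno b hsb' (by omega)]; simp
      · rw [pvFirst_empty cs b (by omega), pvFirst_empty cs (b + 1) (by omega)]
    · have heq : start = b + 1 := by omega
      rw [heq]

theorem pvFirst_none (cs : List Char) (start : Nat)
    (hno : ∀ j, start ≤ j → j < cs.length - 4 → pvHit cs j = false) :
    pvFirst cs start = -1 := by
  rcases Nat.lt_or_ge start (cs.length - 4) with h | h
  · rw [pvFirst_skip cs start (cs.length - 4) (by omega)
      (fun j hj1 hj2 => hno j hj1 hj2)]
    exact pvFirst_empty cs _ (le_refl _)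
  · exact pvFirst_empty cs start h

-- ".or" prefix of a drop, character by character
theorem pv_prefix3 (l : List Char) :
    ['.', 'o', 'r'] <+: l ↔ l[0]? = some '.' ∧ l[1]? = some 'o' ∧ l[2]? = some 'r' := by
  match l with
  | [] => simp
  | [a] => simp [List.cons_prefix_cons]
  | [a, b] => simp [List.cons_prefix_cons]
  | a :: b :: c :: t => simp [List.cons_prefix_cons, eq_comm]

theorem pv_prefix2 (l : List Char) :
    PySem.Chars.startswith l ['o', 'r'] = true ↔ l[0]? = some 'o' ∧ l[1]? = some 'r' := by
  rw [PySem.Chars.startswith_iff]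
  match l with
  | [] => simp
  | [a] => simp [List.cons_prefix_cons]
  | a :: b :: t => simp [List.cons_prefix_cons, eq_comm]

theorem pv_dotor_prefix_iff (cs : List Char) (j : Nat) :
    ['.', 'o', 'r'] <+: cs.drop j ↔
      cs[j]? = some '.' ∧ cs[j + 1]? = some 'o' ∧ cs[j + 2]? = some 'r' := by
  rw [pv_prefix3]
  simp [List.getElem?_drop]

-- A's whitespace scan is lstrip-then-startswith
theorem findA_ws_eq (rest : List Char) (j : Nat) :
    findA_ws rest j = PySem.Chars.startswith (PySem.Chars.lstrip (rest.drop j)) ['('] := by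
  rw [findA_ws]
  by_cases h : j < rest.length
  · have hdrop : rest.drop j = rest[j] :: rest.drop (j + 1) := List.drop_eq_getElem_cons h
    by_cases hsp : PySem.Chars.isspace rest[j] = true
    · rw [dif_pos h, if_pos hsp, findA_ws_eq rest (j + 1)]
      unfold PySem.Chars.lstrip
      rw [hdrop, List.dropWhile_cons_of_pos hsp]
    · rw [dif_pos h, if_neg hsp]
      unfold PySem.Chars.lstrip PySem.Chars.startswith
      rw [hdrop, List.dropWhile_cons_of_neg hsp]
      simp [List.isPrefixOf, eq_comm]
  · have hnil : rest.drop j = [] := List.drop_eq_nil_of_le (by omega)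
    rw [dif_neg h, hnil]
    simp [PySem.Chars.lstrip, PySem.Chars.startswith, List.isPrefixOf]
termination_by rest.length - j
decreasing_by omega

-- Chars.count of a single-character needle is List.count
theorem pv_count_go_singleton (c : Char) (fuel : Nat) (l : List Char) (acc : Nat)
    (h : l.length ≤ fuel) :
    PySem.Chars.count.go [c] fuel l acc = acc + l.count c := by
  induction fuel generalizing l acc with
  | zero =>
    have : l = [] := List.eq_nil_of_length_eq_zero (by omega)
    subst this; simp [PySem.Chars.count.go]
  | succ fuel ih =>
    match l with
    | [] => simp [PySem.Chars.count.go]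
    | a :: t =>
      rw [PySem.Chars.count.go]
      by_cases hc : c = a
      · subst hc
        simp only [List.isPrefixOf, BEq.rfl, Bool.and_eq_true, List.isPrefixOf_nil_left,
          and_true, if_pos]
        rw [show (List.drop [c].length (c :: t)) = t by simp]
        rw [ih t (acc + 1) (by simpa using Nat.lt_succ_iff.mp (by simpa using h))]
        simp [List.count_cons]
        omega
      · have : [c].isPrefixOf (a :: t) = false := by
          simp [List.isPrefixOf, hc]
        rw [this]
        simp only [Bool.false_eq_true, if_neg, not_false_iff]
        rw [ih t acc (by simp at h ⊢; omega)]
        have hc' : ¬a = c := fun hh => hc hh.symm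
        simp [List.count_cons, hc']
theorem pv_count_singleton (l : List Char) (c : Char) :
    PySem.Chars.count l [c] = l.count c := by
  rw [PySem.Chars.count]
  simp only [List.isEmpty_eq_false_iff, List.isEmpty_iff]
  rw [if_neg (by simp)]
  simpa using pv_count_go_singleton c l.length l 0 le_rfl

-- the balance counters step by one character
theorem pv_take_succ_count (cs : List Char) (a : Nat) (h : a < cs.length) (c : Char) :
    (cs.take (a + 1)).count c = (cs.take a).count c + (if cs[a] = c then 1 else 0) := by
  have hsome : cs[a]? = some cs[a] := List.getElem?_eq_getElem h
  rw [List.take_succ, hsome, Option.toList_some, List.count_append]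
  by_cases hx : cs[a] = c
  · simp [hx, List.count_singleton]
  · have hx' : ¬(cs[a] == c) = true := by simp [beq_iff_eq, hx]
    simp [List.count_cons, hx', hx]

-- A's loop computes pvFirst
theorem findA_go_eq (cs : List Char) (k a : Nat) (depth : Int)
    (hk : a + k = cs.length - 4)
    (hd : depth = ((cs.take a).count '(' : Int) - (cs.take a).count ')') :
    findA_go cs depth (List.range' a k) = pvFirst cs a := by
  induction k generalizing a depth with
  | zero =>
    simp [findA_go, pvFirst_empty cs a (by omega)]
  | succ k ih =>
    have ha4 : a < cs.length - 4 := by omega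
    have halen : a < cs.length := by omega
    have hlen5 : a + 5 ≤ cs.length := by omega
    have hch : cs.getD a ' ' = cs[a] := List.getD_eq_getElem cs ' ' halen
    have hget? : cs[a]? = some cs[a] := List.getElem?_eq_getElem halen
    rw [List.range'_succ, findA_go]
    simp only [hch]
    set ch := cs[a] with hchdef
    have hdep' :
        (if ch == '(' then depth + 1 else if ch == ')' then depth - 1 else depth) =
          ((cs.take (a + 1)).count '(' : Int) - (cs.take (a + 1)).count ')' := by
      rw [pv_take_succ_count cs a halen '(', pv_take_succ_count cs a halen ')']
      by_cases h1 : ch = '('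
      · have h2 : ¬ch = ')' := by rw [h1]; decide
        rw [if_pos (show (ch == '(') = true by simp [h1]), if_pos h1, if_neg h2, hd]
        push_cast; ring
      · by_cases h2 : ch = ')'
        · rw [if_neg (show ¬(ch == '(') = true by simp [h1]),
            if_pos (show (ch == ')') = true by simp [h2]), if_neg h1, if_pos h2, hd]
          push_cast; ring
        · rw [if_neg (show ¬(ch == '(') = true by simp [h1]),
            if_neg (show ¬(ch == ')') = true by simp [h2]), if_neg h1, if_neg h2, hd]
          push_cast; ring
    rw [hdep']
    set depth' := ((cs.take (a + 1)).count '(' : Int) - (cs.take (a + 1)).count ')' with hd'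
    have hrest0 : (cs.drop (a + 1))[0]? = cs[a + 1]? := by simp [List.getElem?_drop]
    have hrest1 : (cs.drop (a + 1))[1]? = cs[a + 2]? := by rw [List.getElem?_drop]
    have hdrop2 : (cs.drop (a + 1)).drop 2 = cs.drop (a + 3) := by rw [List.drop_drop]
    have hchars : PySem.Chars.startswith (cs.drop (a + 1)) ['o', 'r'] = true ↔
        (cs[a + 1]? = some 'o' ∧ cs[a + 2]? = some 'r') := by
      rw [pv_prefix2, hrest0, hrest1]
    have hws_eq : findA_ws (cs.drop (a + 1)) 2 =
        PySem.Chars.startswith (PySem.Chars.lstrip (cs.drop (a + 3))) ['('] := by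
      rw [findA_ws_eq, hdrop2]
    have hrec : findA_go cs depth' (List.range' (a + 1) k) = pvFirst cs (a + 1) :=
      ih (a + 1) depth' (by omega) hd'
    rw [pvFirst_cons cs a ha4]
    by_cases hdot : ch = '.'
    · have hstep1 := pv_take_succ_count cs a halen '('
      have hstep2 := pv_take_succ_count cs a halen ')'
      rw [← hchdef, hdot] at hstep1 hstep2
      rw [if_neg (by decide)] at hstep1
      rw [if_neg (by decide)] at hstep2
      by_cases h0 : depth' = 0
      · have hbal : (cs.take a).count '(' = (cs.take a).count ')' := by
          rw [hd', hstep1, hstep2] at h0; omega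
        by_cases hor : PySem.Chars.startswith (cs.drop (a + 1)) ['o', 'r'] = true
        · by_cases hws : findA_ws (cs.drop (a + 1)) 2 = true
          · have hhit : pvHit cs a = true := by
              rw [pvHit_iff]
              exact ⟨hlen5, hbal, by rw [hget?, hdot], (hchars.mp hor).1,
                (hchars.mp hor).2, by rw [← hws_eq]; exact hws⟩
            conv_rhs => rw [if_pos hhit]
            rw [if_neg (by simp [h0]), if_neg (by simp [hdot]), if_neg (by simp [hor]),
              if_pos hws]
          · have hnohit : pvHit cs a = false := by
              rcases hh : pvHit cs a with _ | _
              · rfl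
              · exact absurd (hws_eq.trans ((pvHit_iff cs a).mp hh).2.2.2.2.2) hws
            conv_rhs => rw [if_neg (by simp [hnohit])]
            rw [if_neg (by simp [h0]), if_neg (by simp [hdot]), if_neg (by simp [hor]),
              if_neg hws, hrec]
        · have hnohit : pvHit cs a = false := by
            rcases hh : pvHit cs a with _ | _
            · rfl
            · obtain ⟨_, _, _, ho, hr, _⟩ := (pvHit_iff cs a).mp hh
              exact absurd (hchars.mpr ⟨ho, hr⟩) hor
          conv_rhs => rw [if_neg (by simp [hnohit])]
          rw [if_neg (by simp [h0]), if_neg (by simp [hdot]),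
            if_pos (by simp [Bool.eq_false_iff.mpr hor]), hrec]
      · have hnohit : pvHit cs a = false := by
          rcases hh : pvHit cs a with _ | _
          · rfl
          · have hbal := ((pvHit_iff cs a).mp hh).2.1
            exact absurd (by rw [hd', hstep1, hstep2, hbal]; ring) h0
        conv_rhs => rw [if_neg (by simp [hnohit])]
        rw [if_pos (by simp only [bne_iff_ne, ne_eq]; exact h0), hrec]
    · have hnohit : pvHit cs a = false := by
        rcases hh : pvHit cs a with _ | _
        · rfl
        · have hdotq := ((pvHit_iff cs a).mp hh).2.2.1
          rw [hget?] at hdotq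
          exact absurd (Option.some_injective _ hdotq) hdot
      conv_rhs => rw [if_neg (by simp [hnohit])]
      by_cases h0 : depth' = 0
      · rw [if_neg (by simp [h0]), if_pos (by simp only [bne_iff_ne, ne_eq]; exact hdot), hrec]
      · rw [if_pos (by simp only [bne_iff_ne, ne_eq]; exact h0), hrec]

-- B's loop computes pvFirst
theorem findB_go_eq (cs : List Char) (fuel start : Nat)
    (hs : start ≤ cs.length) (hf : cs.length - start < fuel) :
    findB_go cs fuel start = pvFirst cs start := by
  induction fuel generalizing start with
  | zero => omega
  | succ fuel ih =>
    rw [findB_go]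
    set i := PySem.Chars.findFrom cs ['.', 'o', 'r'] (start : Int) none with hi
    by_cases hneg : i = -1
    · have hnoinf := (PySem.Chars.findFrom_natCast_eq_neg_one_iff cs ['.', 'o', 'r'] start hs).mp hneg
      have hnone : pvFirst cs start = -1 := by
        apply pvFirst_none
        intro j hj1 hj2
        by_contra hcon
        have hhit : pvHit cs j = true := by simpa using hcon
        obtain ⟨_, _, hd, ho, hr, _⟩ := (pvHit_iff cs j).mp hhit
        have hpre : ['.', 'o', 'r'] <+: cs.drop j := (pv_dotor_prefix_iff cs j).mpr ⟨hd, ho, hr⟩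
        have hdj : cs.drop j = (cs.drop start).drop (j - start) := by
          rw [List.drop_drop]; congr 1; omega
        rw [hdj] at hpre
        exact hnoinf (hpre.isInfix.trans (List.drop_suffix (j - start) (cs.drop start)).isInfix)
      simp [hneg, hnone]
    · obtain ⟨hge, hpre, hmin⟩ :=
        PySem.Chars.findFrom_natCast_spec cs ['.', 'o', 'r'] start hs hneg
      have hipos : 0 ≤ i := le_trans (by positivity) hge
      set c := i.toNat with hc
      have hic : i = (c : Int) := by omega
      have hnohit_lt : ∀ j, start ≤ j → j < c → pvHit cs j = false := by
        intro j hj1 hj2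
        by_contra hcon
        have hhit : pvHit cs j = true := by simpa using hcon
        obtain ⟨_, _, hd, ho, hr, _⟩ := (pvHit_iff cs j).mp hhit
        exact hmin j hj1 hj2 ((pv_dotor_prefix_iff cs j).mpr ⟨hd, ho, hr⟩)
      by_cases hbig : (cs.length : Int) - 4 ≤ i
      · have hnone : pvFirst cs start = -1 := by
          apply pvFirst_none
          intro j hj1 hj2
          exact hnohit_lt j hj1 (by omega)
        simp [hbig, hnone]
      · push_neg at hbig
        have hclt : c < cs.length - 4 := by omega
        have hskip : pvFirst cs start = pvFirst cs c :=
          pvFirst_skip cs start c (by omega) hnohit_lt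
        obtain ⟨hd, ho, hr⟩ := (pv_dotor_prefix_iff cs c).mp hpre
        have hslice0 : PySem.List.slice cs (some 0) (some ((c : Int))) = cs.take c := by
          rw [PySem.List.slice_zero_start, PySem.List.slice_to cs (show (0:Int) ≤ (c:Int) by positivity)]
          simp
        have hslice3 : PySem.List.slice cs (some ((c : Int) + 3)) none = cs.drop (c + 3) := by
          rw [PySem.List.slice_from cs (show (0:Int) ≤ (c:Int) + 3 by positivity)]
          have htn : ((c : Int) + 3).toNat = c + 3 := by omega
          rw [htn]
        have hgneg : ¬((((c : Int) == -1) || decide ((cs.length : Int) - 4 ≤ (c : Int))) = true) := by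
          have h1 : (((c : Int)) == -1) = false := by
            simp only [beq_eq_false_iff_ne, ne_eq]; omega
          have h2 : decide ((cs.length : Int) - 4 ≤ (c : Int)) = false := by
            simp only [decide_eq_false_iff_not]; omega
          rw [h1, h2]
          simp
        have hrec : findB_go cs fuel (c + 1) = pvFirst cs (c + 1) :=
          ih (c + 1) (by omega) (by omega)
        rw [hskip, pvFirst_cons cs c hclt, hic, if_neg hgneg,
          hslice0, pv_count_singleton, pv_count_singleton, hslice3]
        by_cases hbal : (cs.take c).count '(' = (cs.take c).count ')'
        · by_cases hws : PySem.Chars.startswith (PySem.Chars.lstrip (cs.drop (c + 3))) ['('] = true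
          · have hhit : pvHit cs c = true :=
              (pvHit_iff cs c).mpr ⟨by omega, hbal, hd, ho, hr, hws⟩
            rw [if_pos (by simp [hbal]), if_pos hws, if_pos hhit]
          · have hnohit : pvHit cs c = false := by
              by_contra hcon
              exact hws ((pvHit_iff cs c).mp (by simpa using hcon)).2.2.2.2.2
            rw [if_pos (by simp [hbal]), if_neg (by simp [hws]), if_neg (by simp [hnohit])]
            simpa using hrec
        · have hnohit : pvHit cs c = false := by
            by_contra hcon
            exact hbal ((pvHit_iff cs c).mp (by simpa using hcon)).2.1
          rw [if_neg (by simp [hbal]), if_neg (by simp [hnohit])]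
          simpa using hrec

-- ===== VERDICT (by name: the statement is the Claim_ definition above) =====
theorem find_dot_or_py_spec : Claim_equal_find_dot_or_py := by
  intro s _
  unfold Spec_find_dot_or_py
  show findA_go s.toList 0 (List.range (s.toList.length - 4)) =
       findB_go s.toList (s.toList.length + 1) 0
  rw [List.range_eq_range']
  rw [findA_go_eq s.toList (s.toList.length - 4) 0 0 (by omega) (by simp)]
  rw [findB_go_eq s.toList (s.toList.length + 1) 0 (by omega) (by omega)]
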